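-- pv_equiv track=rewrite | github.com/ccrngd1/ProtoGensis | aegis-firewall/aegis/policy/engine.py | _get_max_severity
-- ===== SOURCE A (Python) =====
-- from typing import Dict, Any, List, Optional
--
-- def _get_max_severity(scanner_results: List[Dict[str, Any]]) -> str:
--     """
--     Get maximum severity across all scanner results.
--
--     Args:
--         scanner_results: List of scanner result dicts
--
--     Returns:
--         Maximum severity level (none/low/medium/high)
--     """
--     severity_order = {'none': 0, 'low': 1, 'medium': 2, 'high': 3}
--     max_sev = 'none'
--     max_val = 0
--
--     for result in scanner_results:
--         sev = result.get('severity', 'none')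
--         val = severity_order.get(sev, 0)
--         if val > max_val:
--             max_val = val
--             max_sev = sev
--
--     return max_sev
-- ===== SOURCE B (Python) =====
-- def _get_max_severity(scanner_results):
--     for level in ('high', 'medium', 'low'):
--         if any(r.get('severity') == level for r in scanner_results):
--             return level
--     return 'none'
-- ===== Notes on version B (the rewrite author's own statement) =====
-- stated objective: idiomatic
-- what changed: Replaces the max-value-tracking accumulator pass with a priority-ordered loop over the three levels that returns the first level any result carries, using any() with short-circuiting.
import Mathlib
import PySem

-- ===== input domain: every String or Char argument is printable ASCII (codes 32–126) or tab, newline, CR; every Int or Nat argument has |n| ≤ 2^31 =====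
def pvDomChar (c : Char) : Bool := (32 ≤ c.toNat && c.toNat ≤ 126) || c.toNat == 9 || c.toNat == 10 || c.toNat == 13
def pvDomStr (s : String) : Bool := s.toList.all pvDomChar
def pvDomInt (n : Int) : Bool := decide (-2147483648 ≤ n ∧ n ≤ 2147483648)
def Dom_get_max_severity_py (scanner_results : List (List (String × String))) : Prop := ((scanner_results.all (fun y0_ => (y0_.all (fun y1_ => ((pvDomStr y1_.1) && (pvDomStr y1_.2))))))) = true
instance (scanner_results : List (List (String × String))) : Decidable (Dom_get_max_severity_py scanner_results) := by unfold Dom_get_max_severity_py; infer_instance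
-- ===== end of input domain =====

-- ===== PORT A =====
-- B rewrites A's max-tracking pass as a priority-ordered scan per level (idiomatic; same cost).
def get_max_severity_py (scanner_results : List (List (String × String))) : String :=
  let severity_order : PySem.Dict String Int :=
    PySem.Dict.mk [("none", 0), ("low", 1), ("medium", 2), ("high", 3)]
  let st := scanner_results.foldl
    (fun (st : String × Int) result =>
      let sev := (PySem.Dict.mk result).getD "severity" "none"
      let val := severity_order.getD sev 0
      if val > st.2 then (sev, val) else st)
    ("none", 0)
  st.1

-- ===== PORT B =====
-- loop 'for level in ('high','medium','low')' with any(...) and early return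
def gmsAltLoop (scanner_results : List (List (String × String))) : List String → String
  | [] => "none"
  | level :: rest =>
      if scanner_results.any (fun r => (PySem.Dict.mk r).get? "severity" == some level) then level
      else gmsAltLoop scanner_results rest

def get_max_severity_py_alt (scanner_results : List (List (String × String))) : String :=
  gmsAltLoop scanner_results ["high", "medium", "low"]

-- ===== PRECONDITION & SPEC =====
def Spec_get_max_severity_py (scanner_results : List (List (String × String))) (out : String) : Prop := out = get_max_severity_py_alt scanner_results
instance (scanner_results : List (List (String × String))) (out : String) : Decidable (Spec_get_max_severity_py scanner_results out) := by unfold Spec_get_max_severity_py; infer_instance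

-- ===== CLAIM (what is proved, stated in full; the proofs are below) =====
def Claim_equal_get_max_severity_py : Prop := ∀ (scanner_results : List (List (String × String))), Dom_get_max_severity_py scanner_results → Spec_get_max_severity_py scanner_results (get_max_severity_py scanner_results)

-- ===== LEMMAS AND PROOFS =====

-- rank of one result dict
def gmsRk (r : List (String × String)) : Int :=
  match (PySem.Dict.mk r).get? "severity" with
  | some "high" => 3
  | some "medium" => 2
  | some "low" => 1
  | _ => 0

-- canonical state for each rank
def gmsRep (m : Int) : String × Int :=
  if m = 3 then ("high", 3) else if m = 2 then ("medium", 2)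
  else if m = 1 then ("low", 1) else ("none", 0)

-- rank of a whole list
def gmsG (xs : List (List (String × String))) : Int := xs.foldr (fun x acc => max (gmsRk x) acc) 0

-- the step function of A's fold, named for the proofs
def gmsF (st : String × Int) (result : List (String × String)) : String × Int :=
  let sev := (PySem.Dict.mk result).getD "severity" "none"
  let val := (PySem.Dict.mk [("none", (0:Int)), ("low", 1), ("medium", 2), ("high", 3)]).getD sev 0
  if val > st.2 then (sev, val) else st

lemma gmsRk_cases (x : List (String × String)) :
    gmsRk x = 0 ∨ gmsRk x = 1 ∨ gmsRk x = 2 ∨ gmsRk x = 3 := by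
  unfold gmsRk; split <;> simp

lemma gmsG_nonneg (xs : List (List (String × String))) : (0:Int) ≤ gmsG xs := by
  induction xs with
  | nil => simp [gmsG]
  | cons a t ih => simp only [gmsG, List.foldr_cons] at ih ⊢; exact le_max_of_le_right ih

lemma gmsG_cases (xs : List (List (String × String))) :
    gmsG xs = 0 ∨ gmsG xs = 1 ∨ gmsG xs = 2 ∨ gmsG xs = 3 := by
  induction xs with
  | nil => simp [gmsG]
  | cons a t ih =>
    simp only [gmsG, List.foldr_cons] at ih ⊢
    rcases gmsRk_cases a with h|h|h|h <;> rcases ih with h'|h'|h'|h' <;> simp [h, h']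

lemma gmsG_le (xs : List (List (String × String))) (r : List (String × String)) (hr : r ∈ xs) :
    gmsRk r ≤ gmsG xs := by
  induction xs with
  | nil => cases hr
  | cons a t ih =>
    simp only [gmsG, List.foldr_cons]
    rcases List.mem_cons.mp hr with h | h
    · subst h; exact le_max_left _ _
    · exact le_max_of_le_right (ih h)

lemma gmsG_mem (xs : List (List (String × String))) :
    gmsG xs = 0 ∨ ∃ r ∈ xs, gmsRk r = gmsG xs := by
  induction xs with
  | nil => left; rfl
  | cons a t ih =>
    simp only [gmsG, List.foldr_cons] at ih ⊢
    rcases le_total (gmsRk a) (t.foldr (fun x acc => max (gmsRk x) acc) 0) with h | h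
    · rw [max_eq_right h]
      rcases ih with h0 | ⟨r, hr, he⟩
      · left; exact h0
      · right; exact ⟨r, List.mem_cons_of_mem a hr, he⟩
    · rw [max_eq_left h]
      right; exact ⟨a, List.mem_cons_self, rfl⟩

lemma gmsStep (m : Int) (hm : m = 0 ∨ m = 1 ∨ m = 2 ∨ m = 3) (x : List (String × String)) :
    gmsF (gmsRep m) x = gmsRep (max m (gmsRk x)) := by
  unfold gmsF gmsRk
  rcases h : (PySem.Dict.mk x).get? "severity" with _ | sev
  · simp only [PySem.Dict.getD_eq_get?_getD, h, Option.getD_none]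
    rcases hm with h0 | h0 | h0 | h0 <;> subst h0 <;> decide
  · simp only [PySem.Dict.getD_eq_get?_getD, h, Option.getD_some]
    by_cases e3 : sev = "high"
    · subst e3; rcases hm with h0 | h0 | h0 | h0 <;> subst h0 <;> decide
    · by_cases e2 : sev = "medium"
      · subst e2; rcases hm with h0 | h0 | h0 | h0 <;> subst h0 <;> decide
      · by_cases e1 : sev = "low"
        · subst e1; rcases hm with h0 | h0 | h0 | h0 <;> subst h0 <;> decide
        · by_cases e0 : sev = "none"
          · subst e0; rcases hm with h0 | h0 | h0 | h0 <;> subst h0 <;> decide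
          · have hv : (PySem.Dict.mk [("none", (0:Int)), ("low", 1), ("medium", 2), ("high", 3)]).get? sev = none := by
              simp only [PySem.Dict.get?_mk_cons, beq_iff_eq]
              rw [if_neg (Ne.symm e0), if_neg (Ne.symm e1), if_neg (Ne.symm e2), if_neg (Ne.symm e3)]
              rfl
            have hmatch : (match some sev with
                | some "high" => (3:Int) | some "medium" => 2 | some "low" => 1 | _ => 0) = 0 := by
              split <;> simp_all
            simp only [hv, Option.getD_none, hmatch]
            have hng : ¬ ((0:Int) > (gmsRep m).2) := by
              rcases hm with h0 | h0 | h0 | h0 <;> subst h0 <;> decide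
            rw [if_neg hng, max_eq_left]
            rcases hm with h0 | h0 | h0 | h0 <;> omega

lemma gmsFold (xs : List (List (String × String))) (m : Int) (hm : m = 0 ∨ m = 1 ∨ m = 2 ∨ m = 3) :
    xs.foldl gmsF (gmsRep m) = gmsRep (max m (gmsG xs)) := by
  induction xs generalizing m with
  | nil => rcases hm with h|h|h|h <;> simp [gmsG, h]
  | cons x t ih =>
    have hm' : max m (gmsRk x) = 0 ∨ max m (gmsRk x) = 1 ∨ max m (gmsRk x) = 2 ∨ max m (gmsRk x) = 3 := by
      rcases hm with h|h|h|h <;> rcases gmsRk_cases x with h'|h'|h'|h' <;> simp [h, h']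
    rw [List.foldl_cons, gmsStep m hm x, ih _ hm']
    congr 1
    simp only [gmsG, List.foldr_cons]
    rw [max_assoc]

lemma gmsAlt_eq (xs : List (List (String × String))) :
    get_max_severity_py_alt xs = (gmsRep (gmsG xs)).1 := by
  unfold get_max_severity_py_alt
  have key : ∀ (l : String) (v : Int), l = "high" ∧ v = 3 ∨ l = "medium" ∧ v = 2 ∨ l = "low" ∧ v = 1 →
      (xs.any (fun r => (PySem.Dict.mk r).get? "severity" == some l) = true ↔ ∃ r ∈ xs, gmsRk r = v) := by
    intro l v hv
    rw [List.any_eq_true]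
    constructor
    · rintro ⟨r, hr, he⟩
      refine ⟨r, hr, ?_⟩
      rw [beq_iff_eq] at he
      rcases hv with ⟨hl, hv⟩ | ⟨hl, hv⟩ | ⟨hl, hv⟩ <;> subst hl <;> subst hv <;> simp [gmsRk, he]
    · rintro ⟨r, hr, he⟩
      refine ⟨r, hr, ?_⟩
      rw [beq_iff_eq]
      unfold gmsRk at he
      rcases hv with ⟨hl, hv⟩ | ⟨hl, hv⟩ | ⟨hl, hv⟩ <;> subst hl <;> subst hv <;>
        (revert he; split <;> simp_all)
  have hpos : ∀ (l : String) (v : Int), l = "high" ∧ v = 3 ∨ l = "medium" ∧ v = 2 ∨ l = "low" ∧ v = 1 →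
      gmsG xs = v →
      xs.any (fun r => (PySem.Dict.mk r).get? "severity" == some l) = true := by
    intro l v hv hg
    rw [key l v hv]
    rcases gmsG_mem xs with h | ⟨r, hr, he⟩
    · exfalso
      rcases hv with ⟨_, hv⟩ | ⟨_, hv⟩ | ⟨_, hv⟩ <;> subst hv <;> omega
    · exact ⟨r, hr, by omega⟩
  have hneg : ∀ (l : String) (v : Int), l = "high" ∧ v = 3 ∨ l = "medium" ∧ v = 2 ∨ l = "low" ∧ v = 1 →
      gmsG xs < v →
      xs.any (fun r => (PySem.Dict.mk r).get? "severity" == some l) = false := by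
    intro l v hv hg
    rw [Bool.eq_false_iff, Ne, key l v hv]
    rintro ⟨r, hr, he⟩
    have := gmsG_le xs r hr
    omega
  rcases gmsG_cases xs with h0 | h0 | h0 | h0 <;> rw [h0]
  · simp [gmsAltLoop, hneg "high" 3 (by simp) (by omega), hneg "medium" 2 (by simp) (by omega),
      hneg "low" 1 (by simp) (by omega), gmsRep]
  · simp [gmsAltLoop, hneg "high" 3 (by simp) (by omega), hneg "medium" 2 (by simp) (by omega),
      hpos "low" 1 (by simp) h0, gmsRep]
  · simp [gmsAltLoop, hneg "high" 3 (by simp) (by omega), hpos "medium" 2 (by simp) h0, gmsRep]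
  · simp [gmsAltLoop, hpos "high" 3 (by simp) h0, gmsRep]

-- ===== VERDICT (by name: the statement is the Claim_ definition above) =====
theorem get_max_severity_py_spec : Claim_equal_get_max_severity_py := by
  intro xs _
  unfold Spec_get_max_severity_py
  rw [gmsAlt_eq]
  show (xs.foldl gmsF ("none", 0)).1 = (gmsRep (gmsG xs)).1
  have h0 : gmsRep 0 = ("none", (0:Int)) := rfl
  rw [← h0, gmsFold xs 0 (Or.inl rfl)]
  rw [max_eq_right (gmsG_nonneg xs)]
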